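-- pv_equiv track=rewrite | github.com/Guillaume225/CaissePro | services/ai-service/app/models/chatbot_engine.py | check_rbac
-- ===== SOURCE A (Python) =====
-- _MODULE_TABLES: dict[str, set[str]] = {
--     "sales": {"sales", "transactions", "orders", "order_items", "payments"},
--     "expenses": {"expenses", "expense_categories", "receipts"},
--     "inventory": {"products", "stock", "inventory", "stock_movements"},
--     "clients": {"clients", "customers", "client_scores"},
-- }
--
-- def check_rbac(
--     query_tables: list[str],
--     allowed_modules: list[str],
-- ) -> tuple[bool, list[str]]:
--     """Check if the user has access to the requested tables.
--
--     Returns (is_allowed, denied_tables).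
--     """
--     allowed_tables: set[str] = set()
--     for module in allowed_modules:
--         allowed_tables.update(_MODULE_TABLES.get(module, set()))
--
--     denied = [t for t in query_tables if t.lower() not in allowed_tables]
--     return len(denied) == 0, denied
-- ===== SOURCE B (Python) =====
-- _MODULE_TABLES: dict[str, set[str]] = {
--     "sales": {"sales", "transactions", "orders", "order_items", "payments"},
--     "expenses": {"expenses", "expense_categories", "receipts"},
--     "inventory": {"products", "stock", "inventory", "stock_movements"},
--     "clients": {"clients", "customers", "client_scores"},
-- }
--
--
-- def check_rbac(
--     query_tables: list[str],
--     allowed_modules: list[str],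
-- ) -> tuple[bool, list[str]]:
--     """Check if the user has access to the requested tables.
--
--     Returns (is_allowed, denied_tables).
--     """
--     denied = [
--         t for t in query_tables
--         if not any(t.lower() in _MODULE_TABLES.get(m, set()) for m in allowed_modules)
--     ]
--     return not denied, denied
-- ===== Notes on version B (the rewrite author's own statement) =====
-- stated objective: alternative
-- what changed: B drops A's precomputed union-of-allowed-tables set and instead checks each query table directly against each allowed module's table set with any(), a per-table nested scan instead of an index built once.
import Mathlib
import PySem

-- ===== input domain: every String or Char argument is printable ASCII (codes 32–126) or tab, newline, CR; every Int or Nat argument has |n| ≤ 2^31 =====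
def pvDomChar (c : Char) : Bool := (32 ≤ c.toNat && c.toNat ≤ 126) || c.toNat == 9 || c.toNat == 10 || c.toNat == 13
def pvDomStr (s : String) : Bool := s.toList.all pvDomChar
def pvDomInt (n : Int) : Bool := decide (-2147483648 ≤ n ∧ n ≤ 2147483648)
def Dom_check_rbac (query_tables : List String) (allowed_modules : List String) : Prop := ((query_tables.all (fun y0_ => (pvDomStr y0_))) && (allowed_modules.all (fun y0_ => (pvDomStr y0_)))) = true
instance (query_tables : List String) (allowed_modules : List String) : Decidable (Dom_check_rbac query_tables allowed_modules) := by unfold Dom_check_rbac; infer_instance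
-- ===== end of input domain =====

-- B replaces A's precomputed union set of allowed tables with a direct per-table
-- any() scan over the allowed modules (alternative decomposition, same results).

-- ===== PORT A =====
-- _MODULE_TABLES (module constant shared by both Pythons)
def pvModuleTables : PySem.Dict String (PySem.Set String) :=
  PySem.Dict.ofList
    [ ("sales", PySem.Set.ofList ["sales", "transactions", "orders", "order_items", "payments"])
    , ("expenses", PySem.Set.ofList ["expenses", "expense_categories", "receipts"])
    , ("inventory", PySem.Set.ofList ["products", "stock", "inventory", "stock_movements"])
    , ("clients", PySem.Set.ofList ["clients", "customers", "client_scores"]) ]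

def check_rbac (query_tables : List String) (allowed_modules : List String) : Bool × List String :=
  -- allowed_tables = set(); for module in allowed_modules: allowed_tables.update(...)
  let allowed_tables : PySem.Set String :=
    allowed_modules.foldl
      (fun s module => PySem.Set.update s (pvModuleTables.getD module PySem.Set.empty))
      PySem.Set.empty
  -- denied = [t for t in query_tables if t.lower() not in allowed_tables]
  let denied := query_tables.filter
    (fun t => !(PySem.Set.contains allowed_tables (PySem.Str.lower t)))
  (denied.length == 0, denied)

-- ===== PORT B =====
def check_rbac_alt (query_tables : List String) (allowed_modules : List String) : Bool × List String :=
  let denied := query_tables.filter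
    (fun t => !(allowed_modules.any
      (fun m => PySem.Set.contains (pvModuleTables.getD m PySem.Set.empty) (PySem.Str.lower t))))
  (denied.isEmpty, denied)

-- ===== PRECONDITION & SPEC =====
def Spec_check_rbac (query_tables : List String) (allowed_modules : List String) (out : Bool × List String) : Prop := out = check_rbac_alt query_tables allowed_modules
instance (query_tables : List String) (allowed_modules : List String) (out : Bool × List String) : Decidable (Spec_check_rbac query_tables allowed_modules out) := by unfold Spec_check_rbac; infer_instance

-- ===== CLAIM (what is proved, stated in full; the proofs are below) =====
def Claim_equal_check_rbac : Prop := ∀ (query_tables : List String) (allowed_modules : List String), Dom_check_rbac query_tables allowed_modules → Spec_check_rbac query_tables allowed_modules (check_rbac query_tables allowed_modules)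

-- ===== LEMMAS AND PROOFS =====

-- membership in the accumulated union set = some allowed module's set contains x
theorem mem_fold_update (ms : List String) (s : PySem.Set String) (x : String) :
    (x ∈ ms.foldl (fun s m => PySem.Set.update s (pvModuleTables.getD m PySem.Set.empty)) s)
      ↔ x ∈ s ∨ ∃ m ∈ ms, x ∈ pvModuleTables.getD m PySem.Set.empty := by
  induction ms generalizing s with
  | nil => simp
  | cons m ms ih =>
      rw [List.foldl_cons, ih, PySem.Set.mem_update]
      simp only [List.mem_cons]
      constructor
      · rintro ((h | h) | ⟨a, ha, hx⟩)
        · exact Or.inl h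
        · exact Or.inr ⟨m, Or.inl rfl, h⟩
        · exact Or.inr ⟨a, Or.inr ha, hx⟩
      · rintro (h | ⟨a, (rfl | ha), hx⟩)
        · exact Or.inl (Or.inl h)
        · exact Or.inl (Or.inr hx)
        · exact Or.inr ⟨a, ha, hx⟩

theorem bool_ext (a b : Bool) (h : a = true ↔ b = true) : (!a) = (!b) := by
  cases a <;> cases b <;> simp_all

theorem len_beq_zero_eq_isEmpty {α : Type} (l : List α) : (l.length == 0) = l.isEmpty := by
  cases l <;> rfl

theorem filter_eq (query_tables allowed_modules : List String) :
    (query_tables.filter (fun t =>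
        !(PySem.Set.contains
          (allowed_modules.foldl
            (fun s module => PySem.Set.update s (pvModuleTables.getD module PySem.Set.empty))
            PySem.Set.empty)
          (PySem.Str.lower t))))
    = query_tables.filter (fun t => !(allowed_modules.any
        (fun m => PySem.Set.contains (pvModuleTables.getD m PySem.Set.empty) (PySem.Str.lower t)))) := by
  apply List.filter_congr
  intro t _
  apply bool_ext
  rw [PySem.Set.contains_iff, mem_fold_update, List.any_eq_true]
  simp

-- ===== VERDICT (by name: the statement is the Claim_ definition above) =====
theorem check_rbac_spec : Claim_equal_check_rbac := by
  intro q m _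
  unfold Spec_check_rbac check_rbac check_rbac_alt
  simp only [filter_eq, len_beq_zero_eq_isEmpty]
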